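-- pv_equiv track=rewrite | github.com/BartoszBiernacki/ABM | disease_spread_model/data_processing/text_processing.py | group_tuples_by_start
-- ===== SOURCE A (Python) =====
-- import itertools
--
-- def group_tuples_by_start(list_of_tuples, start_length):
--     result = {}
--     tuples_starts = [[item for i, item in enumerate(tup) if i < start_length] for tup in list_of_tuples]
--     tuples_starts.sort()
--     unique_tuples_starts = [tuples_starts for tuples_starts, _ in itertools.groupby(tuples_starts)]
--
--     for unique_tuple_start in unique_tuples_starts:
--         tuples_grouped_by_start = []
--         for tup in list_of_tuples:
--             tuple_start = tup[:start_length]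
--             if list(tuple_start) == unique_tuple_start:
--                 tuples_grouped_by_start.append(tup)
--         result[tuple(unique_tuple_start)] = tuples_grouped_by_start
--     return result
-- ===== SOURCE B (Python) =====
-- def group_tuples_by_start(list_of_tuples, start_length):
--     groups = {}
--     for tup in list_of_tuples:
--         groups.setdefault(tup[:start_length], []).append(tup)
--     return dict(sorted(groups.items(), key=lambda kv: kv[0]))
-- ===== Notes on version B (the rewrite author's own statement) =====
-- stated objective: faster
-- what changed: A sorts the list of prefixes, dedups it, and then rescans the whole input list once per unique prefix (O(U*N)); B makes a single pass building a dict of groups keyed by the prefix (setdefault/append) and sorts the U items once at the end.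
-- intended difference: For negative start_length with some tuple longer than -start_length, A silently drops every such tuple (its enumerate-based prefix is () but tup[:start_length] is not, so the tuple lands in no group, e.g. A([(1,2)],-1) = {(): []}), while B groups every tuple under its tup[:start_length] key ({(1,): [(1,2)]}); B's is intended since no tuple should disappear from a grouping. — e.g. on group_tuples_by_start([[1, 2]], -1): A returns [([], [])], B returns [([1], [[1, 2]])]
import Mathlib
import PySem

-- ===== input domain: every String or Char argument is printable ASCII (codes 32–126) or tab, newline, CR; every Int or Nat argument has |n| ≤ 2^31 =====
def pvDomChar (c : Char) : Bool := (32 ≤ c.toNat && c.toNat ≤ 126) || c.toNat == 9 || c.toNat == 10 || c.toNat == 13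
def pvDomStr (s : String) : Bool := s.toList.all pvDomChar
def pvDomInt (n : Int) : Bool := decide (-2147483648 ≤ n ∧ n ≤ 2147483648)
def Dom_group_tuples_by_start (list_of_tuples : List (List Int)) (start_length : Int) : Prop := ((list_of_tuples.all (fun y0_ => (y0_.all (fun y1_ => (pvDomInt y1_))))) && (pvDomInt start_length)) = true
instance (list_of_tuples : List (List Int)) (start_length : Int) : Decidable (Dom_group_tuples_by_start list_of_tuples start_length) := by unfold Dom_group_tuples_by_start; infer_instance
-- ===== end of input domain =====

-- B replaces A's per-unique-prefix rescan of the whole list (plus a sort of all prefixes)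
-- by a single grouping pass into a dict keyed by the prefix, sorting only the items at the end (objective: faster).

-- ===== PORT A =====
def group_tuples_by_start (list_of_tuples : List (List Int)) (start_length : Int) : List (List Int × List (List Int)) :=
  let tuples_starts := list_of_tuples.map (fun tup =>
    ((PySem.List.enumerate tup).filter (fun p => decide (p.1 < start_length))).map (fun p => p.2))
  let sorted_starts := PySem.List.sorted tuples_starts (fun x => x) false
  let unique_tuples_starts :=
    (sorted_starts.foldl
      (fun (st : Option (List Int) × List (List Int)) x =>
        if st.1 = some x then st else (some x, st.2 ++ [x]))
      (none, [])).2
  let result := unique_tuples_starts.foldl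
    (fun (d : PySem.Dict (List Int) (List (List Int))) u =>
      d.insert u (list_of_tuples.foldl
        (fun acc tup => if PySem.List.slice tup none (some start_length) = u then acc ++ [tup] else acc) []))
    PySem.Dict.empty
  result.items

-- ===== PORT B =====
def group_tuples_by_start_alt (list_of_tuples : List (List Int)) (start_length : Int) : List (List Int × List (List Int)) :=
  let groups := list_of_tuples.foldl
    (fun (d : PySem.Dict (List Int) (List (List Int))) tup =>
      d.modify (PySem.List.slice tup none (some start_length)) [] (fun g => g ++ [tup]))
    PySem.Dict.empty
  PySem.List.sorted groups.items (fun kv => kv.1) false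

-- ===== PRECONDITION & SPEC =====
-- For negative start_length with some tuple longer than -start_length, A silently drops every such
-- tuple (its enumerate-based prefix is () but tup[:start_length] is not, so the tuple lands in no
-- group), while B groups every tuple under its tup[:start_length] key; B's value is the intended one
-- since no tuple should disappear from a grouping.
def D_group_tuples_by_start (list_of_tuples : List (List Int)) (start_length : Int) : Prop :=
  start_length < 0 ∧ ∃ t ∈ list_of_tuples, -start_length < (t.length : Int)
instance (list_of_tuples : List (List Int)) (start_length : Int) : Decidable (D_group_tuples_by_start list_of_tuples start_length) := by unfold D_group_tuples_by_start; infer_instance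

def Spec_group_tuples_by_start (list_of_tuples : List (List Int)) (start_length : Int) (out : List (List Int × List (List Int))) : Prop := ¬ D_group_tuples_by_start list_of_tuples start_length → out = group_tuples_by_start_alt list_of_tuples start_length
instance (list_of_tuples : List (List Int)) (start_length : Int) (out : List (List Int × List (List Int))) : Decidable (Spec_group_tuples_by_start list_of_tuples start_length out) := by unfold Spec_group_tuples_by_start; infer_instance

def pvDiffWitness_group_tuples_by_start : List (List Int) × Int := ([[1, 2]], -1)
def pvDiffWitnessOut_group_tuples_by_start : (List (List Int × List (List Int))) × (List (List Int × List (List Int))) := ([([], [])], [([1], [[1, 2]])])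

-- ===== CLAIM (what is proved, stated in full; the proofs are below) =====
def Claim_unchanged_group_tuples_by_start : Prop := ∀ (list_of_tuples : List (List Int)) (start_length : Int), Dom_group_tuples_by_start list_of_tuples start_length → Spec_group_tuples_by_start list_of_tuples start_length (group_tuples_by_start list_of_tuples start_length)
def Claim_changed_group_tuples_by_start : Prop := Dom_group_tuples_by_start (pvDiffWitness_group_tuples_by_start.1) (pvDiffWitness_group_tuples_by_start.2) ∧ D_group_tuples_by_start (pvDiffWitness_group_tuples_by_start.1) (pvDiffWitness_group_tuples_by_start.2) ∧ group_tuples_by_start (pvDiffWitness_group_tuples_by_start.1) (pvDiffWitness_group_tuples_by_start.2) = pvDiffWitnessOut_group_tuples_by_start.1 ∧ group_tuples_by_start_alt (pvDiffWitness_group_tuples_by_start.1) (pvDiffWitness_group_tuples_by_start.2) = pvDiffWitnessOut_group_tuples_by_start.2 ∧ pvDiffWitnessOut_group_tuples_by_start.1 ≠ pvDiffWitnessOut_group_tuples_by_start.2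
def Claim_exact_group_tuples_by_start : Prop := ∀ (list_of_tuples : List (List Int)) (start_length : Int), Dom_group_tuples_by_start list_of_tuples start_length → D_group_tuples_by_start list_of_tuples start_length → group_tuples_by_start list_of_tuples start_length ≠ group_tuples_by_start_alt list_of_tuples start_length

-- ===== LEMMAS AND PROOFS =====

-- consecutive dedup (the itertools.groupby key list) as a recursive function
def pvCd {α : Type} [DecidableEq α] (prev : Option α) : List α → List α
  | [] => []
  | x :: xs => if prev = some x then pvCd prev xs else x :: pvCd (some x) xs

lemma pv_gb_snd {α : Type} [DecidableEq α] : ∀ (ys : List α) (prev : Option α) (acc : List α),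
    (ys.foldl (fun (st : Option α × List α) x => if st.1 = some x then st else (some x, st.2 ++ [x])) (prev, acc)).2
      = acc ++ pvCd prev ys := by
  intro ys
  induction ys with
  | nil => intro prev acc; simp [pvCd]
  | cons x xs ih =>
    intro prev acc
    rw [List.foldl_cons]
    by_cases h : prev = some x
    · have he : (if (prev, acc).1 = some x then (prev, acc) else (some x, acc ++ [x])) = (prev, acc) :=
        if_pos h
      rw [he, ih, pvCd, if_pos h]
    · have he : (if (prev, acc).1 = some x then (prev, acc) else (some x, acc ++ [x])) = (some x, acc ++ [x]) :=
        if_neg h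
      rw [he, ih, pvCd, if_neg h]
      simp

lemma pv_prefix (s : Int) : ∀ (t : List Int) (n : Nat),
    ((PySem.List.enumerate t (n : Int)).filter (fun p => decide (p.1 < s))).map (fun p => p.2)
      = t.take (s - n).toNat := by
  intro t
  induction t with
  | nil => intro n; simp [PySem.List.enumerate_nil]
  | cons x xs ih =>
    intro n
    rw [PySem.List.enumerate_cons, List.filter_cons]
    have h1 : ((n : Int) + 1) = ((n + 1 : Nat) : Int) := by push_cast; ring
    by_cases h : (n : Int) < s
    · rw [if_pos (decide_eq_true h), List.map_cons, h1, ih (n + 1)]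
      have h2 : (s - (n : Int)).toNat = (s - ((n + 1 : Nat) : Int)).toNat + 1 := by
        push_cast; omega
      rw [h2, List.take_succ_cons]
    · rw [if_neg (by simpa using h), h1, ih (n + 1)]
      have h2 : (s - ((n + 1 : Nat) : Int)).toNat = 0 := by push_cast; omega
      have h3 : (s - (n : Int)).toNat = 0 := by omega
      rw [h2, h3, List.take_zero, List.take_zero]

lemma pv_cd_some {α : Type} [DecidableEq α] [LinearOrder α] :
    ∀ (ys : List α), ys.Pairwise (· ≤ ·) → ∀ p, (∀ y ∈ ys, p ≤ y) →
      (pvCd (some p) ys).Pairwise (· < ·) ∧ (∀ z ∈ pvCd (some p) ys, p < z)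
        ∧ (∀ z, z ∈ pvCd (some p) ys ↔ z ∈ ys ∧ z ≠ p) := by
  intro ys
  induction ys with
  | nil => intro _ p _; simp [pvCd]
  | cons x xs ih =>
    intro hpw p hp
    have hx : ∀ y ∈ xs, x ≤ y := (List.pairwise_cons.mp hpw).1
    have hpw' := (List.pairwise_cons.mp hpw).2
    by_cases h : some p = some x
    · have hpx : p = x := by injection h
      have := ih hpw' p (by intro y hy; rw [hpx]; exact hx y hy)
      refine ⟨?_, ?_, ?_⟩
      · simpa [pvCd, h] using this.1
      · simpa [pvCd, h] using this.2.1
      · intro z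
        simp only [pvCd, if_pos h]
        rw [this.2.2 z]
        constructor
        · rintro ⟨hz, hzp⟩; exact ⟨List.mem_cons_of_mem _ hz, hzp⟩
        · rintro ⟨hz, hzp⟩
          rcases List.mem_cons.mp hz with rfl | hz
          · exact absurd hpx.symm hzp
          · exact ⟨hz, hzp⟩
    · have hpx : p ≠ x := fun he => h (by rw [he])
      have hplt : p < x := lt_of_le_of_ne (hp x (List.mem_cons_self)) hpx
      have := ih hpw' x hx
      refine ⟨?_, ?_, ?_⟩
      · simp only [pvCd, if_neg h]
        exact List.pairwise_cons.mpr ⟨this.2.1, this.1⟩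
      · intro z hz
        simp only [pvCd, if_neg h] at hz
        rcases List.mem_cons.mp hz with rfl | hz
        · exact hplt
        · exact lt_trans hplt (this.2.1 z hz)
      · intro z
        simp only [pvCd, if_neg h, List.mem_cons]
        rw [this.2.2 z]
        constructor
        · rintro (rfl | hz)
          · exact ⟨Or.inl rfl, Ne.symm hpx⟩
          · have hxz : x < z := this.2.1 z (by rw [this.2.2 z]; exact hz)
            exact ⟨Or.inr hz.1, ne_of_gt (lt_trans hplt hxz)⟩
        · rintro ⟨(rfl | hz), hzp⟩
          · exact Or.inl rfl
          · by_cases hzx : z = x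
            · exact Or.inl hzx
            · exact Or.inr ⟨hz, hzx⟩

lemma pv_cd_none {α : Type} [DecidableEq α] [LinearOrder α] (ys : List α) (h : ys.Pairwise (· ≤ ·)) :
    (pvCd (none : Option α) ys).Pairwise (· < ·) ∧ ∀ z, z ∈ pvCd (none : Option α) ys ↔ z ∈ ys := by
  cases ys with
  | nil => simp [pvCd]
  | cons x xs =>
    have hx : ∀ y ∈ xs, x ≤ y := (List.pairwise_cons.mp h).1
    have := pv_cd_some xs (List.pairwise_cons.mp h).2 x hx
    constructor
    · simp only [pvCd, reduceCtorEq, if_neg, not_false_iff]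
      exact List.pairwise_cons.mpr ⟨this.2.1, this.1⟩
    · intro z
      simp only [pvCd, reduceCtorEq, if_neg, not_false_iff, List.mem_cons]
      rw [this.2.2 z]
      constructor
      · rintro (rfl | ⟨hz, _⟩)
        · exact Or.inl rfl
        · exact Or.inr hz
      · rintro (rfl | hz)
        · exact Or.inl rfl
        · by_cases hzx : z = x
          · exact Or.inl hzx
          · exact Or.inr ⟨hz, hzx⟩

lemma pv_cd_subset {α : Type} [DecidableEq α] : ∀ (ys : List α) (prev : Option α) (z : α),
    z ∈ pvCd prev ys → z ∈ ys := by
  intro ys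
  induction ys with
  | nil => intro prev z h; simp [pvCd] at h
  | cons x xs ih =>
    intro prev z h
    by_cases hp : prev = some x
    · rw [pvCd, if_pos hp] at h
      exact List.mem_cons_of_mem _ (ih prev z h)
    · rw [pvCd, if_neg hp] at h
      rcases List.mem_cons.mp h with rfl | h
      · exact List.mem_cons_self
      · exact List.mem_cons_of_mem _ (ih (some x) z h)

-- PySem.List.sorted with the LinearOrder instances the PySem order lemmas are stated for
def pvSorted {a k : Type} [LinearOrder k] (xs : List a) (key : a -> k) : List a :=
  @PySem.List.sorted a k inferInstance inferInstance xs key false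

lemma pv_sorted_eq {a k : Type} [LinearOrder k] (d : (x y : k) -> Decidable (x < y)) (xs : List a) (key : a -> k) :
    @PySem.List.sorted a k inferInstance d xs key false = pvSorted xs key := by
  unfold pvSorted
  congr 1

lemma pvSorted_pairwise {a k : Type} [LinearOrder k] (xs : List a) (key : a -> k) :
    (pvSorted xs key).Pairwise (fun p q => key p ≤ key q) := PySem.List.sorted_pairwise xs key

lemma pvSorted_mem {a k : Type} [LinearOrder k] (xs : List a) (key : a -> k) (x : a) :
    x ∈ pvSorted xs key ↔ x ∈ xs := PySem.List.mem_sorted xs key false x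

lemma pvSorted_perm {a k : Type} [LinearOrder k] (xs : List a) (key : a -> k) :
    (pvSorted xs key).Perm xs := PySem.List.sorted_perm xs key false

lemma pvSorted_eq_of_perm_of_pairwise_lt {a k : Type} [LinearOrder k] (xs ys : List a) (key : a -> k)
    (h1 : ys.Perm xs) (h2 : ys.Pairwise (fun p q => key p < key q)) : pvSorted xs key = ys :=
  PySem.List.sorted_eq_of_perm_of_pairwise_lt xs ys key h1 h2

lemma pvSorted_ofList_pairwise_lt {k : Type} [LinearOrder k] [BEq k] [LawfulBEq k] (xs : List k) :
    (pvSorted (PySem.Set.ofList xs) (fun x => x)).Pairwise (fun p q => p < q) :=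
  PySem.List.sorted_ofList_pairwise_lt xs

-- the common canonical value: sorted distinct prefixes, each with the in-order filter of the input
lemma pv_A_canon (l : List (List Int)) (s : Int)
    (H : ∀ t ∈ l, PySem.List.slice t none (some s) = t.take s.toNat) :
    group_tuples_by_start l s =
      (pvSorted (PySem.Set.ofList (l.map (fun t => t.take s.toNat))) (fun x => x)).map
        (fun u => (u, l.filter (fun t => decide (t.take s.toNat = u)))) := by
  simp only [group_tuples_by_start]
  rw [pv_sorted_eq]
  have hts : (l.map (fun tup => ((PySem.List.enumerate tup).filter (fun p => decide (p.1 < s))).map (fun p => p.2)))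
      = l.map (fun t => t.take s.toNat) := by
    apply List.map_congr_left
    intro t _
    have := pv_prefix s t 0
    simpa using this
  rw [hts]
  set ts := l.map (fun t => t.take s.toNat) with hts_def
  set ys := pvSorted ts (fun x => x) with hys
  have hchain : ys.Pairwise (fun a b => a ≤ b) := by
    rw [hys]; exact pvSorted_pairwise ts (fun x => x)
  have hcd := pv_cd_none ys hchain
  rw [pv_gb_snd ys none [], List.nil_append]
  set uq := pvCd (none : Option (List Int)) ys with huq
  have hnodup : uq.Nodup := hcd.1.imp (fun h => ne_of_lt h)
  have hmemU : ∀ z, z ∈ uq ↔ z ∈ PySem.Set.ofList ts := by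
    intro z
    rw [hcd.2 z, hys, pvSorted_mem, PySem.Set.mem_ofList]
  have hperm : uq.Perm (PySem.Set.ofList ts) :=
    (List.perm_ext_iff_of_nodup hnodup (PySem.Set.nodup_ofList ts)).mpr hmemU
  have hU : pvSorted (PySem.Set.ofList ts) (fun x => x) = uq :=
    pvSorted_eq_of_perm_of_pairwise_lt _ _ _ hperm hcd.1
  rw [hU]
  have hstep : uq.foldl
      (fun (d : PySem.Dict (List Int) (List (List Int))) u =>
        d.insert u (l.foldl (fun acc tup => if PySem.List.slice tup none (some s) = u then acc ++ [tup] else acc) []))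
      PySem.Dict.empty
      = uq.foldl
      (fun (d : PySem.Dict (List Int) (List (List Int))) u =>
        d.insert u (l.filter (fun t => decide (t.take s.toNat = u)))) PySem.Dict.empty := by
    apply PySem.List.foldl_congr_mem
    intro d u _
    rw [PySem.List.foldl_append_ite_eq_filter, List.nil_append]
    congr 1
    apply List.filter_congr
    intro t ht
    rw [H t ht]
  rw [hstep]
  have hif := PySem.Dict.items_foldl_insert_fresh uq (fun u => u)
      (fun u => l.filter (fun t => decide (t.take s.toNat = u))) PySem.Dict.empty
      (fun a _ => PySem.Dict.contains_empty _) (by simpa using hnodup)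
  simpa using hif

lemma pv_B_canon (l : List (List Int)) (s : Int)
    (H : ∀ t ∈ l, PySem.List.slice t none (some s) = t.take s.toNat) :
    group_tuples_by_start_alt l s =
      (pvSorted (PySem.Set.ofList (l.map (fun t => t.take s.toNat))) (fun x => x)).map
        (fun u => (u, l.filter (fun t => decide (t.take s.toNat = u)))) := by
  simp only [group_tuples_by_start_alt]
  have hstep : l.foldl
      (fun (d : PySem.Dict (List Int) (List (List Int))) tup =>
        d.modify (PySem.List.slice tup none (some s)) [] (fun g => g ++ [tup])) PySem.Dict.empty
      = l.foldl
      (fun (d : PySem.Dict (List Int) (List (List Int))) tup =>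
        d.modify (tup.take s.toNat) [] (fun g => g ++ [tup])) PySem.Dict.empty := by
    apply PySem.List.foldl_congr_mem
    intro d t ht
    rw [H t ht]
  rw [hstep]
  set groups := l.foldl
      (fun (d : PySem.Dict (List Int) (List (List Int))) tup =>
        d.modify (tup.take s.toNat) [] (fun g => g ++ [tup])) PySem.Dict.empty with hgroups
  have hkeys : groups.keys = PySem.Set.ofList (l.map (fun t => t.take s.toNat)) := by
    rw [hgroups, PySem.Dict.keys_foldl_modify_key]
    simp [PySem.Dict.empty, PySem.Set.update_nil_left]
  have hnodupk : groups.keys.Nodup := by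
    rw [hgroups]
    exact PySem.Dict.nodup_keys_foldl_modify_key l (fun t => t.take s.toNat) []
      (fun d t => fun g => g ++ [t]) PySem.Dict.empty PySem.Dict.nodup_keys_empty
  have hgetD : ∀ c, groups.getD c [] = l.filter (fun t => decide (t.take s.toNat = c)) := by
    intro c
    have hmap : groups = (l.map (fun t => (t.take s.toNat, t))).foldl
        (fun (d : PySem.Dict (List Int) (List (List Int))) p => d.modify p.1 [] (fun g => g ++ [p.2]))
        PySem.Dict.empty := by
      rw [hgroups, List.foldl_map]
    rw [hmap, PySem.Dict.getD_foldl_modify_append]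
    have hfc : List.filter (fun x => (x.take s.toNat, x).1 == c) l
        = List.filter (fun t => decide (t.take s.toNat = c)) l := by
      apply List.filter_congr
      intro t _
      rw [Bool.eq_iff_iff]; simp
    simp only [List.filter_map, List.map_map, Function.comp_def]
    rw [hfc]
    simp [PySem.Dict.getD_empty]
  have hitems : groups.items
      = (PySem.Set.ofList (l.map (fun t => t.take s.toNat))).map
          (fun c => (c, l.filter (fun t => decide (t.take s.toNat = c)))) := by
    rw [PySem.Dict.items_eq_map_keys groups hnodupk [], hkeys]
    apply List.map_congr_left
    intro c _
    rw [hgetD c]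
  rw [hitems, pv_sorted_eq]
  apply pvSorted_eq_of_perm_of_pairwise_lt
  · exact ((pvSorted_perm _ _).map _)
  · rw [List.pairwise_map]
    exact pvSorted_ofList_pairwise_lt (l.map (fun t => t.take s.toNat))

-- ===== VERDICT (by name: the statement is the Claim_ definition above) =====
theorem group_tuples_by_start_spec : Claim_unchanged_group_tuples_by_start := by
  intro l s _ hD
  have H : ∀ t ∈ l, PySem.List.slice t none (some s) = t.take s.toNat := by
    intro t ht
    by_cases hs : 0 ≤ s
    · exact PySem.List.slice_to t hs
    · have hlen : (t.length : Int) ≤ -s := by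
        by_contra hc
        exact hD ⟨by omega, t, ht, by omega⟩
      have hk : 0 < (-s).toNat := by omega
      have hsk : s = -(((-s).toNat : Nat) : Int) := by omega
      rw [hsk, PySem.List.slice_to_neg_natCast t (-s).toNat hk]
      have h0 : t.length - (-s).toNat = 0 := by omega
      have h1 : (-(((-s).toNat : Nat) : Int)).toNat = 0 := by omega
      simp [h0]
  unfold Spec_group_tuples_by_start at *
  rw [pv_A_canon l s H, pv_B_canon l s H]

theorem group_tuples_by_start_changed : Claim_changed_group_tuples_by_start := by
  unfold Claim_changed_group_tuples_by_start; decide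

theorem group_tuples_by_start_tight : Claim_exact_group_tuples_by_start := by
  intro l s _ hD heq
  obtain ⟨hs, t0, ht0, hlen⟩ := hD
  set c0 := PySem.List.slice t0 none (some s) with hc0
  have hk : 0 < (-s).toNat := by omega
  have hsk : s = -(((-s).toNat : Nat) : Int) := by omega
  have hc0ne : c0 ≠ [] := by
    have hc0v : c0 = t0.take (t0.length - (-s).toNat) := by
      rw [hc0, hsk, PySem.List.slice_to_neg_natCast t0 (-s).toNat hk]
      congr 1
      omega
    intro h
    rw [h] at hc0v
    have := congrArg List.length hc0v
    simp [List.length_take] at this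
    omega
  -- c0 is the first component of some pair of B's output
  have hBkey : ∃ p ∈ group_tuples_by_start_alt l s, p.1 = c0 := by
    simp only [group_tuples_by_start_alt]
    set groups := l.foldl
      (fun (d : PySem.Dict (List Int) (List (List Int))) tup =>
        d.modify (PySem.List.slice tup none (some s)) [] (fun g => g ++ [tup]))
      PySem.Dict.empty with hgroups
    have hkeys : groups.keys
        = PySem.Set.ofList (l.map (fun t => PySem.List.slice t none (some s))) := by
      rw [hgroups, PySem.Dict.keys_foldl_modify_key]
      rw [PySem.Dict.keys_empty, PySem.Set.update_nil_left]
    have hc0k : c0 ∈ groups.keys := by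
      rw [hkeys, PySem.Set.mem_ofList]
      exact List.mem_map.mpr ⟨t0, ht0, rfl⟩
    have hc0i : c0 ∈ groups.items.map (fun p => p.1) := hc0k
    obtain ⟨p, hpmem, hp1⟩ := List.mem_map.mp hc0i
    exact ⟨p, (PySem.List.mem_sorted _ _ _ _).mpr hpmem, hp1⟩
  -- every first component of A's output is []
  have hAkey : ∀ p ∈ group_tuples_by_start l s, p.1 = ([] : List Int) := by
    intro p hp
    simp only [group_tuples_by_start] at hp
    have hp1 := PySem.Dict.mem_keys_of_mem_items _ hp
    rw [PySem.Dict.keys_foldl_insert, PySem.Dict.keys_empty, PySem.Set.update_nil_left,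
      PySem.Set.mem_ofList, pv_gb_snd _ none [], List.nil_append] at hp1
    have hp2 := pv_cd_subset _ _ _ hp1
    rw [PySem.List.mem_sorted] at hp2
    obtain ⟨t, _, hteq⟩ := List.mem_map.mp hp2
    have hpre := pv_prefix s t 0
    have hz : (s - ((0 : Nat) : Int)).toNat = 0 := by omega
    rw [hz, List.take_zero] at hpre
    rw [← hteq]
    simpa using hpre
  obtain ⟨p, hp, hp1⟩ := hBkey
  rw [← heq] at hp
  exact hc0ne (hp1 ▸ hAkey p hp)
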